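-- pv_equiv track=rewrite | github.com/leesdolphin/archivelib-rs | test_case_gen.py | bytes_to_rust_array
-- ===== SOURCE A (Python) =====
-- def bytes_to_rust_array(data):
--     aparts = []
--     out = ""
--     for b in data:
--         aparts.append(f"0x{b:02X},")
--         if len(aparts) >= 16:
--             out += f'{"  ".join(aparts)}\n'
--             aparts = []
--     if aparts:
--         out += f'{"  ".join(aparts)}\n'
--     return f"[\n{out}]\n"
-- ===== SOURCE B (Python) =====
-- def bytes_to_rust_array(data):
--     # Tokenize once, then emit 16-token lines by slicing at a stepping index
--     # (no counter/flush state as in A); join the lines at the end.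
--     parts = [f"0x{b:02X}," for b in data]
--     lines = []
--     i = 0
--     while i < len(parts):
--         lines.append("  ".join(parts[i:i+16]) + "\n")
--         i += 16
--     return "[\n" + "".join(lines) + "]\n"
-- ===== Notes on version B (the rewrite author's own statement) =====
-- stated objective: alternative
-- what changed: B first builds the full token list, then emits lines by slicing 16 tokens at a time from the front, instead of A's single pass with an accumulator list, a >=16 flush inside the loop and a trailing flush after it.
import Mathlib
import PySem

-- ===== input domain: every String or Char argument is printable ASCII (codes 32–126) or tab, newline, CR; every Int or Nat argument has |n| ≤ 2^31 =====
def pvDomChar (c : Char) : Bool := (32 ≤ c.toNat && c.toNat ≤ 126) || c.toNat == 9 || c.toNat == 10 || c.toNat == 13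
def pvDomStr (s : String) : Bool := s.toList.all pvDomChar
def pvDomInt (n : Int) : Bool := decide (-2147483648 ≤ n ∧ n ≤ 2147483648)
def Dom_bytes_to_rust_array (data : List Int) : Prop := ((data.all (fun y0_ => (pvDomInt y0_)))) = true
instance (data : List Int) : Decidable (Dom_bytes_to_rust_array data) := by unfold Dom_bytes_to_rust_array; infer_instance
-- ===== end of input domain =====

-- B tokenizes the whole input first and emits 16-token lines by repeated slicing,
-- instead of A's accumulator-with-flush single pass; alternative decomposition, same cost.


-- ===== PORT A =====
-- Both ports work on List Char (exact code points) and wrap with String.mk at the end.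

-- one uppercase hex digit
def pvHexDigit (n : Nat) : Char := ("0123456789ABCDEF".toList)[n]?.getD '0'

-- uppercase hex digits of a Nat (hand port of %X on a nonnegative value; exact)
def pvHexNat (n : Nat) : List Char :=
  if _h : n < 16 then [pvHexDigit n]
  else pvHexNat (n / 16) ++ [pvHexDigit (n % 16)]
decreasing_by exact Nat.div_lt_self (by omega) (by omega)

-- f"0x{b:02X}," : '-' sign in front of the digits of |b|, zero-filled to width 2
-- sign-aware (Python's 0-fill pads between sign and digits) via PySem.Chars.zfill; exact.
def pvTok (b : Int) : List Char :=
  "0x".toList ++ PySem.Chars.zfill (if b < 0 then '-' :: pvHexNat b.natAbs else pvHexNat b.natAbs) 2 ++ [',']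

-- the loop of A: state (aparts, out), flush when len(aparts) >= 16
def pvLoopA : List Int → List (List Char) → List Char → List (List Char) × List Char
  | [], aparts, out => (aparts, out)
  | b :: rest, aparts, out =>
    let aparts' := aparts ++ [pvTok b]
    if 16 ≤ aparts'.length then
      pvLoopA rest [] (out ++ PySem.Chars.join "  ".toList aparts' ++ ['\n'])
    else
      pvLoopA rest aparts' out

-- the trailing 'if aparts: out += ...' of A
def pvFinishA (st : List (List Char) × List Char) : List Char :=
  if st.1 ≠ [] then st.2 ++ PySem.Chars.join "  ".toList st.1 ++ ['\n'] else st.2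

def bytes_to_rust_array (data : List Int) : String :=
  String.mk ("[\n".toList ++ pvFinishA (pvLoopA data [] []) ++ "]\n".toList)

-- ===== PORT B =====
-- B's while loop: i steps by 16, each appended line is the slice parts[i:i+16] joined, plus '\n'
def pvLoopB (parts : List (List Char)) (i : Nat) (lines : List (List Char)) : List (List Char) :=
  if i < parts.length then
    pvLoopB parts (i + 16)
      (lines ++ [PySem.Chars.join "  ".toList (PySem.List.slice parts (some (i : Int)) (some ((i : Int) + 16))) ++ ['\n']])
  else lines
termination_by parts.length - i

def bytes_to_rust_array_alt (data : List Int) : String :=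
  String.mk ("[\n".toList ++ PySem.Chars.join [] (pvLoopB (data.map pvTok) 0 []) ++ "]\n".toList)

-- ===== PRECONDITION & SPEC =====
def Spec_bytes_to_rust_array (data : List Int) (out : String) : Prop := out = bytes_to_rust_array_alt data
instance (data : List Int) (out : String) : Decidable (Spec_bytes_to_rust_array data out) := by unfold Spec_bytes_to_rust_array; infer_instance

-- ===== CLAIM (what is proved, stated in full; the proofs are below) =====
def Claim_equal_bytes_to_rust_array : Prop := ∀ (data : List Int), Dom_bytes_to_rust_array data → Spec_bytes_to_rust_array data (bytes_to_rust_array data)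

-- ===== LEMMAS AND PROOFS =====

-- proof-side view of B's loop: chunk off 16 tokens from the front of a list
def pvChunk (rest : List (List Char)) (out : List Char) : List Char :=
  if rest = [] then out
  else pvChunk (rest.drop 16) (out ++ PySem.Chars.join "  ".toList (rest.take 16) ++ ['\n'])
termination_by rest.length
decreasing_by
  have h0 : rest ≠ [] := by assumption
  have := List.length_pos_of_ne_nil h0
  simp [List.length_drop]
  omega

-- ''.join is concatenation
theorem pvJoin_empty (ls : List (List Char)) : PySem.Chars.join [] ls = ls.flatten := by
  induction ls with
  | nil => simp [PySem.Chars.join, List.intercalate]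
  | cons l ls ih =>
    cases ls with
    | nil => simp [PySem.Chars.join, List.intercalate]
    | cons m ms =>
      simp only [PySem.Chars.join, List.intercalate, List.intersperse,
        List.flatten_cons, List.flatten] at *
      simp [ih]

-- pvLoopB's flattened lines are pvChunk of the dropped suffix
theorem pvLoopB_eq_pvChunk (parts : List (List Char)) (i : Nat) (lines : List (List Char)) :
    (pvLoopB parts i lines).flatten = pvChunk (parts.drop i) lines.flatten := by
  rw [pvLoopB]
  by_cases h : i < parts.length
  · rw [if_pos h, pvLoopB_eq_pvChunk parts (i + 16)]
    have hne : parts.drop i ≠ [] := by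
      intro hc
      have := List.drop_eq_nil_iff.mp hc
      omega
    conv_rhs => rw [pvChunk, if_neg hne]
    have hslice : PySem.List.slice parts (some (i : Int)) (some ((i : Int) + 16))
        = (parts.drop i).take 16 := by
      rw [PySem.List.slice_toNat parts (a := (i : Int)) (b := (i : Int) + 16) (by positivity) (by positivity)]
      congr 1
      omega
    rw [hslice, List.drop_drop]
    simp
  · rw [if_neg h]
    rw [pvChunk, if_pos (by rw [List.drop_eq_nil_iff]; omega)]
termination_by parts.length - i
decreasing_by omega

-- pvChunk's accumulator factors out
theorem pvChunk_out (rest : List (List Char)) (out : List Char) :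
    pvChunk rest out = out ++ pvChunk rest [] := by
  by_cases h : rest = []
  · simp [pvChunk, h]
  · conv_lhs => rw [pvChunk]
    conv_rhs => rw [pvChunk]
    simp only [if_neg h]
    rw [pvChunk_out (rest.drop 16) (out ++ PySem.Chars.join "  ".toList (rest.take 16) ++ ['\n']),
        pvChunk_out (rest.drop 16) ([] ++ PySem.Chars.join "  ".toList (rest.take 16) ++ ['\n'])]
    simp [List.append_assoc]
termination_by rest.length
decreasing_by
  all_goals
    have := List.length_pos_of_ne_nil h
    simp [List.length_drop]
    omega

-- main loop correspondence
theorem pvMain (bs : List Int) (acc : List (List Char)) (out : List Char)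
    (hlt : acc.length < 16) (hne : acc ≠ [] ∨ bs ≠ []) :
    pvFinishA (pvLoopA bs acc out)
      = out ++ PySem.Chars.join "  ".toList (acc ++ (bs.map pvTok).take (16 - acc.length)) ++ ['\n']
          ++ pvChunk ((bs.map pvTok).drop (16 - acc.length)) [] := by
  induction bs generalizing acc out with
  | nil =>
    have hacc : acc ≠ [] := by
      rcases hne with h | h
      · exact h
      · exact absurd rfl h
    simp [pvLoopA, pvFinishA, pvChunk, hacc]
  | cons b bs ih =>
    simp only [pvLoopA, List.length_append, List.length_cons, List.length_nil]
    by_cases h16 : acc.length + 1 = 16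
    · rw [if_pos (by omega)]
      have htake : 16 - acc.length = 1 := by omega
      by_cases hbs : bs = []
      · subst hbs
        simp [pvLoopA, pvFinishA, pvChunk, htake, List.append_assoc]
      · rw [ih [] _ (by simp) (Or.inr hbs)]
        have hts : bs.map pvTok ≠ [] := by simpa using hbs
        conv_rhs => rw [htake]
        simp only [List.map_cons, List.take_succ_cons, List.take_zero, List.drop_succ_cons,
          List.drop_zero, List.nil_append]
        conv_rhs => rw [pvChunk, if_neg hts,
          pvChunk_out ((bs.map pvTok).drop 16) ([] ++ PySem.Chars.join "  ".toList ((bs.map pvTok).take 16) ++ ['\n'])]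
        simp [List.append_assoc]
    · rw [if_neg (by omega)]
      have hacc' : acc ++ [pvTok b] ≠ [] := by simp
      rw [ih (acc ++ [pvTok b]) out (by simp; omega) (Or.inl hacc')]
      have hk : 16 - acc.length = (16 - (acc ++ [pvTok b]).length) + 1 := by
        simp; omega
      rw [hk]
      simp only [List.map_cons, List.take_succ_cons, List.drop_succ_cons, List.append_assoc,
        List.cons_append, List.nil_append]

-- ===== VERDICT (by name: the statement is the Claim_ definition above) =====
theorem bytes_to_rust_array_spec : Claim_equal_bytes_to_rust_array := by
  intro data _
  unfold Spec_bytes_to_rust_array bytes_to_rust_array bytes_to_rust_array_alt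
  cases data with
  | nil => rw [pvJoin_empty, pvLoopB_eq_pvChunk]; simp [pvLoopA, pvFinishA, pvChunk]
  | cons d ds =>
    congr 1
    congr 1
    rw [pvJoin_empty, pvLoopB_eq_pvChunk, List.drop_zero]
    simp only [List.flatten_nil]
    rw [pvMain (d :: ds) [] [] (by simp) (Or.inr (List.cons_ne_nil d ds))]
    have hts : (d :: ds).map pvTok ≠ [] := by simp
    conv_rhs => rw [pvChunk, if_neg hts,
      pvChunk_out (((d :: ds).map pvTok).drop 16) ([] ++ PySem.Chars.join "  ".toList (((d :: ds).map pvTok).take 16) ++ ['\n'])]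
    simp [List.append_assoc]
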